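-- pv_equiv track=rewrite | github.com/Happy-Coding-G/Agent | backend/app/ai/chunking/strategies.py | _split_into_units
-- ===== SOURCE A (Python) =====
-- from typing import List, Optional, Tuple
--
-- def _split_into_units(text: str) -> List[Tuple[str, int]]:
--     """Split text into units by non-empty lines."""
--     units = []
--     lines = text.split("\n")
--     current_unit_lines = []
--     current_pos = 0
--
--     for line in lines:
--         stripped = line.strip()
--         if stripped:
--             current_unit_lines.append(line)
--         else:
--             # Empty line - save current unit if any
--             if current_unit_lines:
--                 unit_text = "\n".join(current_unit_lines)
--                 start = text.index(current_unit_lines[0])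
--                 units.append((unit_text, start))
--                 current_unit_lines = []
--
--     # Handle remaining
--     if current_unit_lines:
--         unit_text = "\n".join(current_unit_lines)
--         start = text.index(current_unit_lines[0])
--         units.append((unit_text, start))
--
--     return units
-- ===== SOURCE B (Python) =====
-- from typing import List, Tuple
--
-- def _split_into_units(text: str) -> List[Tuple[str, int]]:
--     """Split text into units by non-empty lines (index scan over maximal non-blank runs)."""
--     units = []
--     lines = text.split("\n")
--     n = len(lines)
--     i = 0
--     while i < n:
--         if not lines[i].strip():
--             i += 1
--             continue
--         j = i + 1
--         while j < n and lines[j].strip():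
--             j += 1
--         units.append(("\n".join(lines[i:j]), text.index(lines[i])))
--         i = j
--     return units
-- ===== Notes on version B (the rewrite author's own statement) =====
-- stated objective: simpler
-- what changed: Replaces A's accumulator-and-flush state machine (with its duplicated post-loop flush block) by a single index scan that extracts each maximal run of non-blank lines directly via an inner scan, so there is no unit accumulator and no duplicated flush code.
import Mathlib
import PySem

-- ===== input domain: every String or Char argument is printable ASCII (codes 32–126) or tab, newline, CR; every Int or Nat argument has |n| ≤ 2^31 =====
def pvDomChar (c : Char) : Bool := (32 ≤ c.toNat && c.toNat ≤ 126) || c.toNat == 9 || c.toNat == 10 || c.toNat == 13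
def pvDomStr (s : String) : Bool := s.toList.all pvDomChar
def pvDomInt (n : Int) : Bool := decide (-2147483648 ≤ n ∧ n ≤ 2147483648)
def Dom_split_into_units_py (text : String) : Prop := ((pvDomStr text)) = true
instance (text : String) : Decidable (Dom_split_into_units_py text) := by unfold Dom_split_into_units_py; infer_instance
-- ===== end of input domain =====

-- B replaces A's accumulator/flush loop by an index scan over maximal non-blank runs (simpler decomposition, no duplicated flush code).
-- Note: Python's text.index(line) never raises here (each line is a substring of text), so it is ported as PySem.Str.find (exact when found).


-- ===== PORT A =====
-- flush of the current unit: "\n".join(cur) and text.index(cur[0])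
def pvFlush (text : String) (c : String) (cur : List String) : String × Int :=
  (PySem.Str.join "\n" cur, PySem.Str.find text c)

-- the body of A's for-loop over lines, with state (units, current_unit_lines)
def pvStep (text : String) (st : List (String × Int) × List String) (line : String) :
    List (String × Int) × List String :=
  let stripped := PySem.Str.strip line
  if stripped ≠ "" then (st.1, st.2 ++ [line])
  else match st.2 with
    | [] => (st.1, st.2)
    | c :: _ => (st.1 ++ [pvFlush text c st.2], [])

def split_into_units_py (text : String) : List (String × Int) :=
  let lines := (PySem.Str.split? text "\n").getD []   -- sep ≠ "", so split? is some
  let st := lines.foldl (pvStep text) ([], [])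
  match st.2 with
  | [] => st.1
  | c :: _ => st.1 ++ [pvFlush text c st.2]

-- ===== PORT B =====
-- B's scan: at a non-blank line the inner 'while' advances j over the run (= takeWhile),
-- then resumes at i = j (= dropWhile); a blank line just advances i.
def pvAltGo (text : String) : List String → List (String × Int)
  | [] => []
  | l :: ls =>
    if PySem.Str.strip l ≠ "" then
      let run := ls.takeWhile (fun x => PySem.Str.strip x ≠ "")
      let rest := ls.dropWhile (fun x => PySem.Str.strip x ≠ "")
      (PySem.Str.join "\n" (l :: run), PySem.Str.find text l) :: pvAltGo text rest
    else pvAltGo text ls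
  termination_by ls => ls.length
  decreasing_by
    · simpa using Nat.lt_succ_of_le (List.length_dropWhile_le _ _)
    · simp

def split_into_units_py_alt (text : String) : List (String × Int) :=
  pvAltGo text ((PySem.Str.split? text "\n").getD [])

-- ===== PRECONDITION & SPEC =====
def Spec_split_into_units_py (text : String) (out : List (String × Int)) : Prop :=
  out = split_into_units_py_alt text
instance (text : String) (out : List (String × Int)) : Decidable (Spec_split_into_units_py text out) := by
  unfold Spec_split_into_units_py; infer_instance

-- ===== CLAIM =====
def Claim_equal_split_into_units_py : Prop :=
  ∀ (text : String), Dom_split_into_units_py text →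
    Spec_split_into_units_py text (split_into_units_py text)

-- ===== LEMMAS AND PROOFS =====

-- A's loop, as structural recursion on the remaining lines with the current-unit accumulator
def pvULoop (text : String) : List String → List String → List (String × Int)
  | cur, [] => match cur with | [] => [] | c :: _ => [pvFlush text c cur]
  | cur, l :: ls =>
    if PySem.Str.strip l ≠ "" then pvULoop text (cur ++ [l]) ls
    else (match cur with | [] => [] | c :: _ => [pvFlush text c cur]) ++ pvULoop text [] ls

theorem pvStep_pos (text : String) (st : List (String × Int) × List String) (l : String)
    (h : PySem.Str.strip l ≠ "") : pvStep text st l = (st.1, st.2 ++ [l]) := by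
  simp [pvStep, h]

theorem pvStep_neg_nil (text : String) (units : List (String × Int)) (l : String)
    (h : ¬ PySem.Str.strip l ≠ "") : pvStep text (units, []) l = (units, []) := by
  simp [pvStep, h]

theorem pvStep_neg_cons (text : String) (units : List (String × Int)) (c : String)
    (cs : List String) (l : String) (h : ¬ PySem.Str.strip l ≠ "") :
    pvStep text (units, c :: cs) l = (units ++ [pvFlush text c (c :: cs)], []) := by
  simp only [pvStep, if_neg h]

theorem pvFoldl_eq_uLoop (text : String) (ls : List String)
    (units : List (String × Int)) (cur : List String) :
    (let st := ls.foldl (pvStep text) (units, cur)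
     match st.2 with
     | [] => st.1
     | c :: _ => st.1 ++ [pvFlush text c st.2]) = units ++ pvULoop text cur ls := by
  induction ls generalizing units cur with
  | nil =>
    simp only [List.foldl_nil, pvULoop]
    cases cur <;> simp
  | cons l ls ih =>
    rw [List.foldl_cons]
    simp only [pvULoop]
    by_cases h : PySem.Str.strip l ≠ ""
    · rw [pvStep_pos text _ l h, if_pos h]
      exact ih units (cur ++ [l])
    · rw [if_neg h]
      cases cur with
      | nil => rw [pvStep_neg_nil text units l h]; simpa using ih units []
      | cons c cs =>
        rw [pvStep_neg_cons text units c cs l h]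
        simpa [List.append_assoc] using ih (units ++ [pvFlush text c (c :: cs)]) []

-- a non-empty all-non-blank accumulator absorbs the leading non-blank run
theorem pvULoop_cons (text : String) (ls : List String) (c : String) (cs : List String) :
    pvULoop text (c :: cs) ls =
      (PySem.Str.join "\n" (c :: cs ++ ls.takeWhile (fun x => PySem.Str.strip x ≠ "")),
        PySem.Str.find text c)
      :: pvULoop text [] (ls.dropWhile (fun x => PySem.Str.strip x ≠ "")) := by
  induction ls generalizing cs with
  | nil => simp [pvULoop, pvFlush]
  | cons l ls ih =>
    by_cases h : PySem.Str.strip l ≠ ""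
    · simp only [pvULoop, if_pos h, List.takeWhile_cons, List.dropWhile_cons, decide_eq_true h]
      simpa [List.append_assoc] using ih (cs ++ [l])
    · simp only [pvULoop, if_neg h, List.takeWhile_cons, List.dropWhile_cons,
        decide_eq_false h, pvFlush]
      simp [pvULoop, if_neg h]

theorem pvULoop_nil_eq_altGo (text : String) (ls : List String) :
    pvULoop text [] ls = pvAltGo text ls := by
  induction hn : ls.length using Nat.strong_induction_on generalizing ls with
  | _ n ih =>
    cases ls with
    | nil => simp [pvULoop, pvAltGo]
    | cons l ls =>
      by_cases h : PySem.Str.strip l ≠ ""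
      · rw [pvULoop, if_pos h, List.nil_append, pvULoop_cons, pvAltGo]
        rw [if_pos h]
        subst hn
        rw [ih _ (Nat.lt_succ_of_le (List.length_dropWhile_le _ _)) _ rfl]
        rfl
      · rw [pvULoop, if_neg h, pvAltGo, if_neg h]
        subst hn
        simpa using ih ls.length (Nat.lt_succ_self _) ls rfl

-- ===== VERDICT =====
theorem split_into_units_py_spec : Claim_equal_split_into_units_py := by
  intro text _
  unfold Spec_split_into_units_py split_into_units_py split_into_units_py_alt
  rw [pvFoldl_eq_uLoop text _ [] []]
  simpa using pvULoop_nil_eq_altGo text ((PySem.Str.split? text "\n").getD [])
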